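-- pv_equiv track=rewrite | github.com/Weilory/ConvexHull | RadarSearch_StepPlot.py | find_bottom_left
-- ===== SOURCE A (Python) =====
-- def find_bottom_left(dts):
--     bottoms = [dts[0]]
--     for dt in dts:
--         if dt[1] < bottoms[0][1]:
--             bottoms = [dt]
--         elif dt[1] == bottoms[0][1]:
--             bottoms.append(dt)
--     bottom_left = bottoms[0]
--     for dt in bottoms:
--         if dt[0] < bottom_left[0]:
--             bottom_left = dt
--     return bottom_left
-- ===== SOURCE B (Python) =====
-- def find_bottom_left(dts):
--     best = dts[0]
--     for dt in dts:
--         if (dt[1], dt[0]) < (best[1], best[0]):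
--             best = dt
--     return best
-- ===== Notes on version B (the rewrite author's own statement) =====
-- stated objective: simpler
-- what changed: A's two passes (collect all min-y points, then scan them for min x) are collapsed into one pass keeping a single running lexicographic (y,x) minimum with strict comparison, preserving A's first-occurrence tie-breaking.
import Mathlib
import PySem

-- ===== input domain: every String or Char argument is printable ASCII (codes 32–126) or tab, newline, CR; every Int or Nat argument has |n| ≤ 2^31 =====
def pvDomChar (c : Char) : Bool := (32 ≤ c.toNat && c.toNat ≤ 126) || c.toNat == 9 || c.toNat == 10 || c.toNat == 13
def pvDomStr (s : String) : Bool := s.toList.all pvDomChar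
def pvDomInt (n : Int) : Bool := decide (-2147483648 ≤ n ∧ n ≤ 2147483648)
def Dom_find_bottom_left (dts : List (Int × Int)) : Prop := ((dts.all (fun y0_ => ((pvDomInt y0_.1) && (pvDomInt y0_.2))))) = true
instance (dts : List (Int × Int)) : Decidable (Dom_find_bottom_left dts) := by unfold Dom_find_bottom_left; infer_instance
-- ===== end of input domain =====

-- B replaces A's two passes (collect all min-y points, then scan for min x) by one pass
-- keeping a single running lexicographic (y,x) minimum; objective: simpler.

-- ===== PORT A =====
-- first loop body: rebuild / extend the list of min-y candidates
def fblStep (bs : List (Int × Int)) (dt : Int × Int) : List (Int × Int) :=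
  if dt.2 < (bs.headD (0, 0)).2 then [dt]
  else if dt.2 = (bs.headD (0, 0)).2 then bs ++ [dt]
  else bs

-- second loop body: keep the first min-x candidate
def fblMinX (bl dt : Int × Int) : Int × Int :=
  if dt.1 < bl.1 then dt else bl

def find_bottom_left (dts : List (Int × Int)) : Int × Int :=
  match dts with
  | [] => (0, 0)  -- Python raises IndexError on dts[0]; excluded by Pre_
  | d0 :: _ =>
    let bottoms := dts.foldl fblStep [d0]
    bottoms.foldl fblMinX (bottoms.headD (0, 0))

-- ===== PORT B =====
-- loop body: strict lexicographic (y, x) comparison, keeping the first minimum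
def fblBest (best dt : Int × Int) : Int × Int :=
  if dt.2 < best.2 ∨ (dt.2 = best.2 ∧ dt.1 < best.1) then dt else best

def find_bottom_left_alt (dts : List (Int × Int)) : Int × Int :=
  match dts with
  | [] => (0, 0)  -- Python raises IndexError on dts[0]; excluded by Pre_
  | d0 :: _ => dts.foldl fblBest d0

-- ===== PRECONDITION & SPEC =====
-- Pre_ excludes exactly the empty list, on which both Pythons raise IndexError at dts[0].
def Pre_find_bottom_left (dts : List (Int × Int)) : Prop := dts ≠ []
instance (dts : List (Int × Int)) : Decidable (Pre_find_bottom_left dts) := by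
  unfold Pre_find_bottom_left; infer_instance
def pvWitness_find_bottom_left : (List (Int × Int)) := [(2, 1), (0, 1), (3, 0)]

def Spec_find_bottom_left (dts : List (Int × Int)) (out : Int × Int) : Prop := out = find_bottom_left_alt dts
instance (dts : List (Int × Int)) (out : Int × Int) : Decidable (Spec_find_bottom_left dts out) := by unfold Spec_find_bottom_left; infer_instance

-- ===== CLAIM (what is proved, stated in full; the proofs are below) =====
def Claim_equal_find_bottom_left : Prop := ∀ (dts : List (Int × Int)), Dom_find_bottom_left dts → Pre_find_bottom_left dts → Spec_find_bottom_left dts (find_bottom_left dts)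

-- ===== LEMMAS AND PROOFS =====

-- the second-loop accumulator keeps the common y of the candidate list
theorem fbl_minx_y (c : Int) (l : List (Int × Int)) :
    ∀ acc : Int × Int, acc.2 = c → (∀ p ∈ l, p.2 = c) → (l.foldl fblMinX acc).2 = c := by
  induction l with
  | nil => intro acc ha _; simpa using ha
  | cons p t ih =>
    intro acc ha hl
    simp only [List.foldl_cons]
    apply ih
    · unfold fblMinX
      split
      · exact hl p (by simp)
      · exact ha
    · intro q hq; exact hl q (by simp [hq])

-- one step of A's candidate-list loop followed by the min-x scan equals one step of B's loop
theorem fbl_step_eq (bs : List (Int × Int)) (dt : Int × Int) (hne : bs ≠ [])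
    (hinv : ∀ p ∈ bs, p.2 = (bs.headD (0, 0)).2) :
    ((fblStep bs dt).foldl fblMinX ((fblStep bs dt).headD (0, 0)))
      = fblBest (bs.foldl fblMinX (bs.headD (0, 0))) dt := by
  obtain ⟨h, t, rfl⟩ := List.exists_cons_of_ne_nil hne
  have hy : ((h :: t).foldl fblMinX ((h :: t).headD (0, 0))).2 = h.2 := by
    apply fbl_minx_y
    · simp
    · intro p hp; simpa using hinv p hp
  unfold fblStep fblBest
  simp only [List.headD_cons] at *
  rcases lt_trichotomy dt.2 h.2 with hlt | heq | hgt
  · rw [if_pos hlt, if_pos (Or.inl (hy ▸ hlt))]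
    simp [fblMinX]
  · rw [if_neg (by omega), if_pos heq]
    have hhd : ((h :: t) ++ [dt]).headD ((0 : Int), (0 : Int)) = h := by simp
    rw [hhd, List.foldl_append]
    have hyeq : dt.2 = ((h :: t).foldl fblMinX h).2 := by rw [hy]; exact heq
    by_cases hx : dt.1 < ((h :: t).foldl fblMinX h).1
    · rw [if_pos (Or.inr ⟨hyeq, hx⟩)]
      show fblMinX (List.foldl fblMinX h (h :: t)) dt = dt
      simp only [fblMinX]
      rw [if_pos hx]
    · rw [if_neg (by rw [hy]; omega)]
      show fblMinX (List.foldl fblMinX h (h :: t)) dt = List.foldl fblMinX h (h :: t)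
      simp only [fblMinX]
      rw [if_neg hx]
  · rw [if_neg (by omega), if_neg (by omega), if_neg (by rw [hy]; omega),
      List.headD_cons]

-- A's candidate-list step preserves nonemptiness and the common-y invariant
theorem fbl_step_inv (bs : List (Int × Int)) (dt : Int × Int) (hne : bs ≠ [])
    (hinv : ∀ p ∈ bs, p.2 = (bs.headD (0, 0)).2) :
    fblStep bs dt ≠ [] ∧ ∀ p ∈ fblStep bs dt, p.2 = ((fblStep bs dt).headD (0, 0)).2 := by
  obtain ⟨h, t, rfl⟩ := List.exists_cons_of_ne_nil hne
  unfold fblStep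
  simp only [List.headD_cons] at *
  split
  · simp
  · split
    · refine ⟨by simp, ?_⟩
      intro p hp
      have hhd : ((h :: t) ++ [dt]).headD ((0 : Int), (0 : Int)) = h := by simp
      rw [hhd]
      rcases List.mem_append.mp hp with hmem | hmem
      · exact hinv p hmem
      · simp only [List.mem_singleton] at hmem; subst hmem; assumption
    · exact ⟨by simp, hinv⟩

-- main invariant: A's two folds over the remaining input equal B's single fold
theorem fbl_main (dts : List (Int × Int)) :
    ∀ bs : List (Int × Int), bs ≠ [] → (∀ p ∈ bs, p.2 = (bs.headD (0, 0)).2) →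
      ((dts.foldl fblStep bs).foldl fblMinX ((dts.foldl fblStep bs).headD (0, 0)))
        = dts.foldl fblBest (bs.foldl fblMinX (bs.headD (0, 0))) := by
  induction dts with
  | nil => intro bs _ _; rfl
  | cons dt rest ih =>
    intro bs hne hinv
    obtain ⟨hne', hinv'⟩ := fbl_step_inv bs dt hne hinv
    simp only [List.foldl_cons]
    rw [ih (fblStep bs dt) hne' hinv', fbl_step_eq bs dt hne hinv]

-- ===== VERDICT (by name: the statement is the Claim_ definition above) =====
theorem find_bottom_left_spec : Claim_equal_find_bottom_left := by
  intro dts _ hpre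
  unfold Spec_find_bottom_left
  obtain ⟨d0, rest, rfl⟩ := List.exists_cons_of_ne_nil hpre
  unfold find_bottom_left find_bottom_left_alt
  simp only
  have h := fbl_main (d0 :: rest) [d0] (by simp) (by simp)
  rw [h]
  simp [fblMinX]
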